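-- pv_equiv track=rewrite | github.com/GordonChen19/SMMU | preprocessing/yt_mp4.py | summarize_process_output
-- ===== SOURCE A (Python) =====
-- def summarize_process_output(stdout: str, stderr: str) -> str:
--     lines = []
--     for block in (stdout, stderr):
--         for line in str(block or "").splitlines():
--             clean = line.strip()
--             if clean:
--                 lines.append(clean)
--     return lines[-1] if lines else ""
-- ===== SOURCE B (Python) =====
-- def summarize_process_output(stdout: str, stderr: str) -> str:
--     # Scan in reverse (stderr first, lines last-to-first) and return the first
--     # non-empty stripped line found; no list is accumulated.
--     for block in (stderr, stdout):
--         for line in reversed(str(block or "").splitlines()):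
--             clean = line.strip()
--             if clean:
--                 return clean
--     return ""
-- ===== Notes on version B (the rewrite author's own statement) =====
-- stated objective: simpler
-- what changed: Instead of accumulating every non-empty stripped line of both blocks and taking the last, B walks stderr then stdout in reverse line order and returns the first non-empty stripped line, with early exit and no list.
import Mathlib
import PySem

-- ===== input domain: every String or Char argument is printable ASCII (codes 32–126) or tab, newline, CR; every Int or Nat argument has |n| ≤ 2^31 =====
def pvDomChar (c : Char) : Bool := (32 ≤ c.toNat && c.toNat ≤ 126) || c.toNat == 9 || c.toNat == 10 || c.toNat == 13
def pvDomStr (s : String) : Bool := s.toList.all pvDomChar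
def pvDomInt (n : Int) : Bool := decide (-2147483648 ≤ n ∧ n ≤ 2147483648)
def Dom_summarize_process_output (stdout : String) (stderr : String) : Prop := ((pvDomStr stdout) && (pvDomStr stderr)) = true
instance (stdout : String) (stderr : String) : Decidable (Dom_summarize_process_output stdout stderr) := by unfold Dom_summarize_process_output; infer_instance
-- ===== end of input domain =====

-- B replaces A's accumulate-all-then-take-last with a reverse scan (stderr first,
-- lines last-to-first) that returns the first non-empty stripped line; simpler, early exit.

-- ===== PORT A =====
def summarize_process_output (stdout : String) (stderr : String) : String :=
  -- lines = []; for block in (stdout, stderr): for line in str(block or "").splitlines(): …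
  let lines : List String :=
    [stdout, stderr].foldl (fun acc block =>
      (PySem.Str.splitlines block).foldl (fun acc line =>
        let clean := PySem.Str.strip line
        if clean ≠ "" then acc ++ [clean] else acc) acc) []
  -- lines[-1] if lines else ""
  match lines.getLast? with
  | some l => l
  | none => ""

-- ===== PORT B =====
-- 'for line in reversed(lines): clean = line.strip(); if clean: return clean' on one block
def pvFirstCleanRev : List String → Option String
  | [] => none
  | line :: rest =>
    let clean := PySem.Str.strip line
    if clean ≠ "" then some clean else pvFirstCleanRev rest

def summarize_process_output_alt (stdout : String) (stderr : String) : String :=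
  match pvFirstCleanRev (PySem.Str.splitlines stderr).reverse with
  | some c => c
  | none =>
    match pvFirstCleanRev (PySem.Str.splitlines stdout).reverse with
    | some c => c
    | none => ""

-- ===== PRECONDITION & SPEC =====
def Spec_summarize_process_output (stdout : String) (stderr : String) (out : String) : Prop := out = summarize_process_output_alt stdout stderr
instance (stdout : String) (stderr : String) (out : String) : Decidable (Spec_summarize_process_output stdout stderr out) := by unfold Spec_summarize_process_output; infer_instance

-- ===== CLAIM (what is proved, stated in full; the proofs are below) =====
def Claim_equal_summarize_process_output : Prop := ∀ (stdout : String) (stderr : String), Dom_summarize_process_output stdout stderr → Spec_summarize_process_output stdout stderr (summarize_process_output stdout stderr)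

-- ===== LEMMAS AND PROOFS =====

def pvClean (line : String) : Option String :=
  let c := PySem.Str.strip line
  if c ≠ "" then some c else none

-- A's inner loop appends exactly the cleaned lines: foldl = acc ++ filterMap pvClean
theorem pvFoldl_eq_filterMap (ls : List String) (acc : List String) :
    ls.foldl (fun acc line =>
      let clean := PySem.Str.strip line
      if clean ≠ "" then acc ++ [clean] else acc) acc
    = acc ++ ls.filterMap pvClean := by
  induction ls generalizing acc with
  | nil => simp
  | cons l rest ih =>
    rw [List.foldl_cons, List.filterMap_cons]
    by_cases h : PySem.Str.strip l = "" <;>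
      simp only [pvClean, h, if_neg, if_pos, ne_eq, not_true_eq_false, ite_false,
        not_false_eq_true, ite_true, ih] <;> simp [h]

-- B's reverse scan is head? of the reversed cleaned lines = getLast? of the cleaned lines
theorem pvFirstCleanRev_eq_head (ls : List String) :
    pvFirstCleanRev ls = (ls.filterMap pvClean).head? := by
  induction ls with
  | nil => rfl
  | cons l rest ih =>
    rw [pvFirstCleanRev, List.filterMap_cons]
    by_cases h : PySem.Str.strip l = "" <;>
      simp only [pvClean, h, ne_eq, not_true_eq_false, ite_false, not_false_eq_true,
        ite_true, ih] <;> simp [h]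

theorem pvFirstCleanRev_reverse (ls : List String) :
    pvFirstCleanRev ls.reverse = (ls.filterMap pvClean).getLast? := by
  rw [pvFirstCleanRev_eq_head, List.filterMap_reverse, List.head?_reverse]

-- ===== VERDICT (by name: the statement is the Claim_ definition above) =====
theorem summarize_process_output_spec : Claim_equal_summarize_process_output := by
  intro stdout stderr _
  unfold Spec_summarize_process_output summarize_process_output summarize_process_output_alt
  rw [pvFirstCleanRev_reverse, pvFirstCleanRev_reverse]
  simp only [List.foldl_cons, List.foldl_nil, pvFoldl_eq_filterMap, List.nil_append,
    List.getLast?_append]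
  cases ((PySem.Str.splitlines stderr).filterMap pvClean).getLast? <;>
    cases ((PySem.Str.splitlines stdout).filterMap pvClean).getLast? <;> simp
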